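-- pv_equiv track=rewrite | github.com/nkossally/leet_code | Python/2571. Minimum Operations to Reduce an Integer to 0.py | minOperationsFast
-- ===== SOURCE A (Python) =====
-- def minOperationsFast( n: int) -> int:
--     res = 0
--     while n > 0:
--         if n % 2 == 0:
--             n >>= 1
--         elif (n & 2) > 0:
--             n += 1
--             res += 1
--         else:
--             res += 1
--             n >>= 2
--     return res
-- ===== SOURCE B (Python) =====
-- def minOperationsFast(n: int) -> int:
--     # Minimization DP: an odd number must spend one op (+1 or -1), which leaves
--     # an even number that is immediately halved; an even number halves for free.
--     memo = {}
--
--     def f(m):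
--         if m <= 0:
--             return 0
--         if m in memo:
--             return memo[m]
--         if m % 2 == 0:
--             r = f(m // 2)
--         elif m == 1:
--             r = 1
--         else:
--             r = 1 + min(f((m - 1) // 2), f((m + 1) // 2))
--         memo[m] = r
--         return r
--
--     return f(n)
-- ===== Notes on version B (the rewrite author's own statement) =====
-- stated objective: alternative
-- what changed: Replaces A's greedy bit-pattern loop (decide +1 vs -1 from n&2 and shift) with a memoized minimizing recursion: even numbers halve for free, odd numbers pay one op and take the cheaper of (n-1)/2 and (n+1)/2.
import Mathlib
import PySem

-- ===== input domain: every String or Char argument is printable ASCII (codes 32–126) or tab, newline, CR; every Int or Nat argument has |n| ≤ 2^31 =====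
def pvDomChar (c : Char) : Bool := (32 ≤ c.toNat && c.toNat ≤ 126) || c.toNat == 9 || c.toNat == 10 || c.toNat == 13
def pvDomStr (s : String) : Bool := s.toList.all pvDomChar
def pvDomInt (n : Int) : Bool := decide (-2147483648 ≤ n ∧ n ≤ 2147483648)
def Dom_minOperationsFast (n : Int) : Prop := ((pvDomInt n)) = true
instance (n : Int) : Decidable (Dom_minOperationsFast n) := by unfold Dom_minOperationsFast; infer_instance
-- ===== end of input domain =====

-- B replaces A's greedy bit-pattern loop by a memoized minimizing recursion
-- (odd numbers try both ±1, even numbers halve); objective: alternative, same result.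

-- ===== PORT A =====
-- A's while loop, step for step; the Nat fuel only bounds the iteration count
-- (n + 2 steps always suffice, proved below), it changes no computed value.
-- 'n >>= k' is Int's arithmetic shift '>>>' (Python-exact per PySem),
-- 'n % 2' is PySem.Int.mod, 'n & 2' is PySem.Int.band.
def pvLoopA : Nat → Int → Int → Int
  | 0, _, res => res
  | fuel + 1, n, res =>
    if 0 < n then
      if PySem.Int.mod n 2 = 0 then pvLoopA fuel (n >>> (1 : Nat)) res
      else if 0 < PySem.Int.band n 2 then pvLoopA fuel (n + 1) (res + 1)
      else pvLoopA fuel (n >>> (2 : Nat)) (res + 1)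
    else res

def minOperationsFast (n : Int) : Int := pvLoopA (n + 2).toNat n 0

-- ===== PORT B =====
-- Source B's helper f, branch for branch; the dict memo of Source B is pure caching
-- (identical values either way); the Nat fuel only bounds the recursion depth
-- (n + 1 always suffices, proved below), it changes no computed value.
def pvAltF : Nat → Int → Int
  | 0, _ => 0
  | fuel + 1, m =>
    if m ≤ 0 then 0
    else if PySem.Int.mod m 2 = 0 then pvAltF fuel (PySem.Int.floordiv m 2)
    else if m = 1 then 1
    else 1 + min (pvAltF fuel (PySem.Int.floordiv (m - 1) 2))
                 (pvAltF fuel (PySem.Int.floordiv (m + 1) 2))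

def minOperationsFast_alt (n : Int) : Int := pvAltF (n.toNat + 1) n

-- ===== PRECONDITION & SPEC =====
def Spec_minOperationsFast (n : Int) (out : Int) : Prop := out = minOperationsFast_alt n
instance (n : Int) (out : Int) : Decidable (Spec_minOperationsFast n out) := by unfold Spec_minOperationsFast; infer_instance

-- ===== CLAIM (what is proved, stated in full; the proofs are below) =====
def Claim_equal_minOperationsFast : Prop := ∀ (n : Int), Dom_minOperationsFast n → Spec_minOperationsFast n (minOperationsFast n)

-- ===== LEMMAS AND PROOFS =====

theorem pvBand_two (n : Int) (h : 0 ≤ n) : PySem.Int.band n 2 = 2 * (n / 2 % 2) := by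
  rw [PySem.Int.band_of_nonneg h (by norm_num), show Int.toNat 2 = 2 from rfl]
  have h2 := Nat.and_two_pow n.toNat 1
  rw [Nat.testBit_eq_decide_div_mod_eq] at h2
  norm_num at h2
  by_cases h1 : n.toNat / 2 % 2 = 1 <;> simp [h1] at h2 <;> omega

theorem pvShift1 (n : Int) : n >>> (1 : Nat) = n / 2 := by simp [Int.shiftRight_eq_div_pow]

theorem pvShift2 (n : Int) : n >>> (2 : Nat) = n / 4 := by simp [Int.shiftRight_eq_div_pow]

-- the fuel-free function pvAltF computes (proof-side only; ediv form)
def pvF (m : Int) : Int :=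
  if m ≤ 0 then 0
  else if m % 2 = 0 then pvF (m / 2)
  else if m = 1 then 1
  else 1 + min (pvF ((m - 1) / 2)) (pvF ((m + 1) / 2))
termination_by m.toNat
decreasing_by all_goals omega

theorem pvF_nonpos {m : Int} (h : m ≤ 0) : pvF m = 0 := by
  rw [pvF]; simp [h]

theorem pvF_even {m : Int} (h : 0 < m) (he : m % 2 = 0) : pvF m = pvF (m / 2) := by
  rw [pvF, if_neg (by omega : ¬ m ≤ 0), if_pos he]

theorem pvF_one : pvF 1 = 1 := by rw [pvF]; norm_num

theorem pvF_odd {m : Int} (h : 1 < m) (ho : m % 2 = 1) :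
    pvF m = 1 + min (pvF ((m - 1) / 2)) (pvF ((m + 1) / 2)) := by
  rw [pvF, if_neg (by omega : ¬ m ≤ 0), if_neg (by omega : ¬ m % 2 = 0),
      if_neg (by omega : ¬ m = 1)]

theorem pvF_nonneg : ∀ (k : Nat) (m : Int), m.toNat ≤ k → 0 ≤ pvF m := by
  intro k
  induction k with
  | zero =>
    intro m hm
    rw [pvF_nonpos (by omega)]
  | succ k ih =>
    intro m hm
    by_cases h : m ≤ 0
    · rw [pvF_nonpos h]
    · push_neg at h
      rcases Int.emod_two_eq m with he | ho
      · rw [pvF_even h he]; exact ih _ (by omega)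
      · by_cases h1 : m = 1
        · rw [h1, pvF_one]; omega
        · rw [pvF_odd (by omega) ho]
          have a := ih ((m - 1) / 2) (by omega)
          have b := ih ((m + 1) / 2) (by omega)
          rw [min_def]; split_ifs <;> omega

theorem pvF_nonneg' (m : Int) : 0 ≤ pvF m := pvF_nonneg m.toNat m le_rfl

-- |F(m+1) - F(m)| ≤ 1, the two directions
theorem pvF_succ_le : ∀ (k : Nat) (m : Int), m.toNat ≤ k → pvF (m + 1) ≤ pvF m + 1 := by
  intro k
  induction k with
  | zero =>
    intro m hm
    by_cases h : m + 1 ≤ 0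
    · rw [pvF_nonpos h]; have := pvF_nonneg' m; omega
    · have hm0 : m = 0 := by omega
      rw [hm0]; norm_num [pvF_one, pvF_nonpos]
  | succ k ih =>
    intro m hm
    by_cases h : m ≤ 0
    · by_cases h' : m + 1 ≤ 0
      · rw [pvF_nonpos h']; have := pvF_nonneg' m; omega
      · have hm0 : m = 0 := by omega
        rw [hm0]; norm_num [pvF_one, pvF_nonpos]
    · push_neg at h
      rcases Int.emod_two_eq m with he | ho
      · -- m ≥ 2 even, m+1 odd ≥ 3
        rw [pvF_odd (by omega : (1:Int) < m + 1) (by omega), pvF_even h he]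
        have e1 : (m + 1 - 1) / 2 = m / 2 := by omega
        have e2 : (m + 1 + 1) / 2 = m / 2 + 1 := by omega
        rw [e1, e2]
        have hih := ih (m / 2) (by omega)
        rw [min_def]; split_ifs <;> omega
      · -- m odd, m+1 even
        rw [pvF_even (m := m + 1) (by omega) (by omega)]
        by_cases h1 : m = 1
        · rw [h1]; norm_num [pvF_one]
        · rw [pvF_odd (by omega) ho]
          have e1 : (m + 1) / 2 = (m - 1) / 2 + 1 := by omega
          have hih := ih ((m - 1) / 2) (by omega)
          rw [e1]
          rw [min_def]; split_ifs <;> omega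

theorem pvF_le_succ : ∀ (k : Nat) (m : Int), m.toNat ≤ k → pvF m ≤ pvF (m + 1) + 1 := by
  intro k
  induction k with
  | zero =>
    intro m hm
    rw [pvF_nonpos (by omega)]
    have := pvF_nonneg' (m + 1); omega
  | succ k ih =>
    intro m hm
    by_cases h : m ≤ 0
    · rw [pvF_nonpos h]; have := pvF_nonneg' (m + 1); omega
    · push_neg at h
      rcases Int.emod_two_eq m with he | ho
      · -- m ≥ 2 even
        rw [pvF_odd (by omega : (1:Int) < m + 1) (by omega), pvF_even h he]
        have e1 : (m + 1 - 1) / 2 = m / 2 := by omega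
        have e2 : (m + 1 + 1) / 2 = m / 2 + 1 := by omega
        rw [e1, e2]
        have hih := ih (m / 2) (by omega)
        rw [min_def]; split_ifs <;> omega
      · -- m odd
        rw [pvF_even (m := m + 1) (by omega) (by omega)]
        by_cases h1 : m = 1
        · rw [h1]; norm_num [pvF_one]
        · rw [pvF_odd (by omega) ho]
          have e1 : (m + 1) / 2 = (m - 1) / 2 + 1 := by omega
          rw [e1]
          have := min_le_right (pvF ((m - 1) / 2)) (pvF ((m - 1) / 2 + 1))
          omega

-- an even number is no more expensive than its odd successor …
theorem pvF_even_le_succ {m : Int} (h : 0 ≤ m) (he : m % 2 = 0) :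
    pvF m ≤ pvF (m + 1) := by
  by_cases h0 : m = 0
  · rw [h0]; norm_num [pvF_one, pvF_nonpos]
  · rw [pvF_odd (by omega : (1:Int) < m + 1) (by omega), pvF_even (by omega) he]
    have e1 : (m + 1 - 1) / 2 = m / 2 := by omega
    have e2 : (m + 1 + 1) / 2 = m / 2 + 1 := by omega
    rw [e1, e2]
    have := pvF_le_succ ((m / 2).toNat) (m / 2) le_rfl
    rw [min_def]; split_ifs <;> omega

-- … and than its odd predecessor
theorem pvF_succ_le_odd {m : Int} (h : 0 < m) (ho : m % 2 = 1) :
    pvF (m + 1) ≤ pvF m := by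
  rw [pvF_even (m := m + 1) (by omega) (by omega)]
  by_cases h1 : m = 1
  · rw [h1]; norm_num [pvF_one]
  · rw [pvF_odd (by omega) ho]
    have e1 : (m + 1) / 2 = (m - 1) / 2 + 1 := by omega
    rw [e1]
    have := pvF_succ_le ((m - 1) / 2).toNat ((m - 1) / 2) le_rfl
    rw [min_def]; split_ifs <;> omega

-- with enough fuel, port B computes pvF
theorem pvAltF_eq_pvF : ∀ (k : Nat) (m : Int), m.toNat < k → pvAltF k m = pvF m := by
  intro k
  induction k with
  | zero => intro m hm; omega
  | succ k ih =>
    intro m hm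
    rw [pvAltF, PySem.Int.mod_eq_emod_of_pos (by norm_num)]
    by_cases h : m ≤ 0
    · rw [if_pos h, pvF_nonpos h]
    · rw [if_neg h]
      rcases Int.emod_two_eq m with he | ho
      · rw [if_pos he, PySem.Int.floordiv_eq_ediv_of_pos (by norm_num),
          ih (m / 2) (by omega), pvF_even (by omega) he]
      · rw [if_neg (by omega : ¬ m % 2 = 0)]
        by_cases h1 : m = 1
        · rw [if_pos h1, h1, pvF_one]
        · rw [if_neg h1,
            PySem.Int.floordiv_eq_ediv_of_pos (a := m - 1) (by norm_num),
            PySem.Int.floordiv_eq_ediv_of_pos (a := m + 1) (by norm_num),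
            ih ((m - 1) / 2) (by omega), ih ((m + 1) / 2) (by omega),
            pvF_odd (by omega) ho]

-- the main invariant: A's loop computes res + pvF n once the fuel covers the measure
theorem pvLoopA_eq : ∀ (k : Nat) (n res : Int),
    (if n % 4 = 3 then n + 2 else n).toNat ≤ k → pvLoopA k n res = res + pvF n := by
  intro k
  induction k with
  | zero =>
    intro n res hk
    have hn : n ≤ 0 := by split_ifs at hk <;> omega
    rw [pvLoopA, pvF_nonpos hn]
    omega
  | succ k ih =>
    intro n res hk
    by_cases h : 0 < n
    · rw [pvLoopA, if_pos h, PySem.Int.mod_eq_emod_of_pos (by norm_num),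
        pvBand_two n (le_of_lt h)]
      rcases Int.emod_two_eq n with he | ho
      · -- even: halve
        rw [if_pos he, pvShift1, ih (n / 2) res (by split_ifs at hk ⊢ <;> omega),
          pvF_even h he]
      · rw [if_neg (by omega : ¬ n % 2 = 0)]
        by_cases hb : 0 < 2 * (n / 2 % 2)
        · -- n % 4 = 3: n += 1
          have h4 : n % 4 = 3 := by omega
          rw [if_pos hb, ih (n + 1) (res + 1) (by split_ifs at hk ⊢ <;> omega)]
          rw [pvF_even (by omega : (0:Int) < n + 1) (by omega)]
          rw [pvF_odd (by omega : (1:Int) < n) ho]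
          have hle : pvF ((n - 1) / 2 + 1) ≤ pvF ((n - 1) / 2) :=
            pvF_succ_le_odd (by omega) (by omega)
          have e2 : (n - 1) / 2 + 1 = (n + 1) / 2 := by omega
          rw [e2] at hle
          rw [min_def]; split_ifs <;> omega
        · -- n % 4 = 1: n >>= 2
          have h4 : n % 4 = 1 := by omega
          rw [if_neg hb, pvShift2, ih (n / 4) (res + 1) (by split_ifs at hk ⊢ <;> omega)]
          by_cases h1 : n = 1
          · rw [h1]; norm_num [pvF_one, pvF_nonpos]
          · rw [pvF_odd (by omega) ho]
            have hev : pvF ((n - 1) / 2) = pvF ((n - 1) / 2 / 2) :=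
              pvF_even (by omega) (by omega)
            have e1 : (n - 1) / 2 / 2 = n / 4 := by omega
            rw [e1] at hev
            have hle : pvF ((n - 1) / 2) ≤ pvF ((n - 1) / 2 + 1) :=
              pvF_even_le_succ (by omega) (by omega)
            have e2 : (n - 1) / 2 + 1 = (n + 1) / 2 := by omega
            rw [e2] at hle
            rw [min_def]; split_ifs <;> omega
    · rw [pvLoopA, if_neg h, pvF_nonpos (by omega : n ≤ 0)]
      omega

-- ===== VERDICT (by name: the statement is the Claim_ definition above) =====
theorem minOperationsFast_spec : Claim_equal_minOperationsFast := by
  intro n _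
  show minOperationsFast n = minOperationsFast_alt n
  rw [minOperationsFast, minOperationsFast_alt,
    pvLoopA_eq ((n + 2).toNat) n 0 (by split_ifs <;> omega),
    pvAltF_eq_pvF (n.toNat + 1) n (by omega)]
  omega
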